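-- pv_equiv track=rewrite | github.com/oneminutesoup/Schedubuddy-backend | query/query.py | _organize_locations
-- ===== SOURCE A (Python) =====
-- import operator
-- from collections import defaultdict
--
-- def _organize_locations(all_locations: dict):
--     """
--     Given a dictionary of locations, it will create a dictionary of those locations with the
--     building name as a key, and the list of locations as the value.
--     """
--     organized_locations = defaultdict(list)
--     for full_location, info in all_locations.items():
--         building = full_location.split()[0]
--         info.update({"name": full_location})
--         organized_locations[building].append(info)
--
--     for location, info_list in organized_locations.items():
--         organized_locations[location].sort(key=operator.itemgetter("name"))
--     return organized_locations
-- ===== SOURCE B (Python) =====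
-- from collections import defaultdict
--
-- def _organize_locations(all_locations: dict):
--     """
--     Single pass: each location's info is inserted into its building's list at
--     its sorted position (by name), so no second sorting pass is needed.
--     Like the original, mutates the info dicts in place (adds "name").
--     """
--     organized_locations = defaultdict(list)
--     for full_location, info in all_locations.items():
--         info["name"] = full_location
--         group = organized_locations[full_location.split()[0]]
--         i = len(group)
--         while i > 0 and group[i - 1]["name"] > full_location:
--             i -= 1
--         group.insert(i, info)
--     return organized_locations
-- ===== Notes on version B (the rewrite author's own statement) =====
-- stated objective: alternative
-- what changed: Replaces collect-then-sort-each-group (two loops, a list.sort per group) with a single pass that inserts each info at its sorted position in its building's list, eliminating the whole second sorting loop.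
import Mathlib
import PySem

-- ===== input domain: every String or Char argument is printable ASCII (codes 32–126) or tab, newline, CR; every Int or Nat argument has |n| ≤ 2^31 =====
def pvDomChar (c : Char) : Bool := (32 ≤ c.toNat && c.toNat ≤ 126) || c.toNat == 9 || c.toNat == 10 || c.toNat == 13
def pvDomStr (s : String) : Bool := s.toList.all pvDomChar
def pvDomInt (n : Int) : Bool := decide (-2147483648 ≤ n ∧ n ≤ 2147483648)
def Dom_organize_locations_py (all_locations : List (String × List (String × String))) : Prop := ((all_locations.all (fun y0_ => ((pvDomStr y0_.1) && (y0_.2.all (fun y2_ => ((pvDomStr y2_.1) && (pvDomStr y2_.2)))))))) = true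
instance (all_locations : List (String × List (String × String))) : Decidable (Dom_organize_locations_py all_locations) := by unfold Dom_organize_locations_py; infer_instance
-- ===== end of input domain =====

-- B replaces A's collect-then-sort-each-group with one pass that inserts each info at its
-- sorted position in its group; equal return value, A's in-place mutation of the info dicts
-- is reproduced by B (equivalence proved about the return value only).

-- info["name"] lookup, total stand-in for itemgetter("name"): exact whenever "name" is
-- present, which holds for every element both programs store.
def pvName (info : List (String × String)) : String :=
  PySem.Dict.getD (PySem.Dict.mk info) "name" ""

-- ===== PORT A =====
def organize_locations_py (all_locations : List (String × List (String × String))) : List (String × List (List (String × String))) :=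
  let org : PySem.Dict String (List (List (String × String))) :=
    all_locations.foldl (fun org kv =>
      let building := (PySem.Str.split₀ kv.1).headD ""   -- split()[0]; exact under Pre_ (split nonempty)
      let info := (PySem.Dict.insert (PySem.Dict.mk kv.2) "name" kv.1).items
      org.insert building (org.getD building [] ++ [info])) (PySem.Dict.mk [])
  (org.keys.foldl (fun d k =>
      d.insert k (PySem.List.sorted (d.getD k []) pvName false)) org).items

-- ===== PORT B =====
-- the while loop: i = len(group); while i > 0 and group[i-1]["name"] > name: i -= 1
def pvFindIdx (group : List (List (String × String))) (name : String) : Nat → Nat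
  | 0 => 0
  | j + 1 => if name < pvName (group.getD j []) then pvFindIdx group name j else j + 1

def organize_locations_py_alt (all_locations : List (String × List (String × String))) : List (String × List (List (String × String))) :=
  (all_locations.foldl (fun org kv =>
      let info := (PySem.Dict.insert (PySem.Dict.mk kv.2) "name" kv.1).items
      let building := (PySem.Str.split₀ kv.1).headD ""
      let group := org.getD building []
      let i := pvFindIdx group kv.1 group.length
      org.insert building (PySem.List.insert group (i : Int) info))
    (PySem.Dict.mk [] : PySem.Dict String (List (List (String × String))))).items

-- ===== PRECONDITION & SPEC =====
-- Pre_ excludes inputs where some location key has no non-whitespace character (split() yields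
-- nothing), on which A raises IndexError at full_location.split()[0].
def Pre_organize_locations_py (all_locations : List (String × List (String × String))) : Prop :=
  ∀ kv ∈ all_locations, PySem.Str.split₀ kv.1 ≠ []
instance (all_locations : List (String × List (String × String))) : Decidable (Pre_organize_locations_py all_locations) := by unfold Pre_organize_locations_py; infer_instance

def pvWitness_organize_locations_py : (List (String × List (String × String))) :=
  [("MEC 2-1", [("capacity", "30")]), ("MEC 2-3", []), ("CAB 235", [("name", "old")])]

def Spec_organize_locations_py (all_locations : List (String × List (String × String))) (out : List (String × List (List (String × String)))) : Prop := out = organize_locations_py_alt all_locations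
instance (all_locations : List (String × List (String × String))) (out : List (String × List (List (String × String)))) : Decidable (Spec_organize_locations_py all_locations out) := by unfold Spec_organize_locations_py; infer_instance

-- ===== CLAIM (what is proved, stated in full; the proofs are below) =====
def Claim_equal_organize_locations_py : Prop := ∀ (all_locations : List (String × List (String × String))), Dom_organize_locations_py all_locations → Pre_organize_locations_py all_locations → Spec_organize_locations_py all_locations (organize_locations_py all_locations)

-- ===== LEMMAS AND PROOFS =====

-- abbreviations used only by the proofs
def pvSorted (l : List (List (String × String))) : List (List (String × String)) :=
  PySem.List.sorted l pvName false

def pvMapV (d : PySem.Dict String (List (List (String × String)))) : PySem.Dict String (List (List (String × String))) :=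
  PySem.Dict.mk (d.items.map (fun p => (p.1, pvSorted p.2)))

-- insertBy inserts before the first element the predicate accepts
theorem pv_insertBy_eq {α : Type} (before : α → α → Bool) (x : α) :
    ∀ s : List α, PySem.List.insertBy before x s
      = s.takeWhile (fun y => !before x y) ++ x :: s.dropWhile (fun y => !before x y) := by
  intro s
  induction s with
  | nil => rfl
  | cons y ys ih =>
    by_cases h : before x y = true
    · simp [PySem.List.insertBy, List.takeWhile, List.dropWhile, h]
    · simp [PySem.List.insertBy, List.takeWhile, List.dropWhile, h, ih]

-- pvFindIdx only reads the first n elements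
theorem pv_findIdx_prefix (name : String) :
    ∀ (n : Nat) (s t : List (List (String × String))), n ≤ s.length →
      pvFindIdx (s ++ t) name n = pvFindIdx s name n := by
  intro n
  induction n with
  | zero => intro s t _; rfl
  | succ j ih =>
    intro s t h
    have hj : j < s.length := Nat.lt_of_succ_le h
    have hget : (s ++ t).getD j [] = s.getD j [] := by
      simp [List.getD_eq_getElem?_getD, List.getElem?_append_left hj]
    simp only [pvFindIdx, hget]
    split
    · exact ih s t (Nat.le_of_lt hj)
    · rfl

-- takeWhile helpers
theorem pv_takeWhile_append_false {α : Type} (p : α → Bool) (y : α) (hy : p y = false) :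
    ∀ l : List α, (l ++ [y]).takeWhile p = l.takeWhile p := by
  intro l
  induction l with
  | nil => simp [List.takeWhile, hy]
  | cons a l ih =>
    by_cases ha : p a = true
    · simp [List.takeWhile, ha, ih]
    · simp [List.takeWhile, ha]

theorem pv_take_length_takeWhile {α : Type} (p : α → Bool) :
    ∀ l : List α, l.take (l.takeWhile p).length = l.takeWhile p := by
  intro l
  induction l with
  | nil => rfl
  | cons a l ih =>
    by_cases ha : p a = true
    · simp [List.takeWhile, ha, ih]
    · simp [List.takeWhile, ha]

theorem pv_drop_length_takeWhile {α : Type} (p : α → Bool) :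
    ∀ l : List α, l.drop (l.takeWhile p).length = l.dropWhile p := by
  intro l
  induction l with
  | nil => rfl
  | cons a l ih =>
    by_cases ha : p a = true
    · simp [List.takeWhile, List.dropWhile, ha, ih]
    · simp [List.takeWhile, List.dropWhile, ha]

-- on a key-sorted list the right-to-left scan stops exactly at the takeWhile boundary
theorem pv_findIdx_sorted (name : String) :
    ∀ s : List (List (String × String)),
      s.Pairwise (fun a b => pvName a ≤ pvName b) →
      pvFindIdx s name s.length = (s.takeWhile (fun y => !decide (name < pvName y))).length := by
  intro s
  induction s using List.reverseRecOn with
  | nil => intro _; rfl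
  | append_singleton s' y ih =>
    intro hp
    have hp' : s'.Pairwise (fun a b => pvName a ≤ pvName b) :=
      hp.sublist (List.sublist_append_left s' [y])
    have hget : (s' ++ [y]).getD s'.length [] = y := by
      simp [List.getD_eq_getElem?_getD]
    have hlen : (s' ++ [y]).length = s'.length + 1 := by simp
    rw [hlen]
    simp only [pvFindIdx, hget]
    by_cases h : name < pvName y
    · -- y is strictly greater: keep scanning; takeWhile never reaches y
      have hpy : (fun z : List (String × String) => !decide (name < pvName z)) y = false := by
        simp [h]
      rw [if_pos h, pv_findIdx_prefix name s'.length s' [y] (Nat.le_refl _), ih hp',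
        pv_takeWhile_append_false _ y hpy]
    · -- y ≤ name: everything (sorted below y) passes, index = full length
      rw [if_neg h]
      have hy : pvName y ≤ name := le_of_not_gt h
      have hall : ∀ z ∈ s' ++ [y], (fun z : List (String × String) => !decide (name < pvName z)) z = true := by
        intro z hz
        rcases List.mem_append.mp hz with hz | hz
        · have : pvName z ≤ pvName y := by
            have := (List.pairwise_append.mp hp).2.2
            exact this z hz y (List.mem_singleton_self y)
          simp [not_lt.mpr (le_trans this hy)]
        · rcases List.mem_singleton.mp hz with rfl
          simp [not_lt.mpr hy]
      rw [List.takeWhile_eq_self_iff.mpr hall]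
      simp

-- key insertion lemma: inserting into a sorted group at pvFindIdx's position = insertBy
theorem pv_insert_eq_insertBy (x : List (String × String)) (name : String)
    (hn : pvName x = name) (s : List (List (String × String)))
    (hp : s.Pairwise (fun a b => pvName a ≤ pvName b)) :
    PySem.List.insert s ((pvFindIdx s name s.length : Nat) : Int) x
      = PySem.List.insertBy (fun a b => decide (pvName a < pvName b)) x s := by
  subst hn
  rw [pv_findIdx_sorted (pvName x) s hp, pv_insertBy_eq]
  have hle : (s.takeWhile (fun y => !decide (pvName x < pvName y))).length ≤ s.length :=
    (List.takeWhile_sublist _).length_le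
  rw [PySem.List.insert_natCast s _ x hle, pv_take_length_takeWhile, pv_drop_length_takeWhile]

-- sorted of an appended element = insertBy into sorted
theorem pv_sorted_append (l : List (List (String × String))) (x : List (String × String)) :
    pvSorted (l ++ [x]) = PySem.List.insertBy (fun a b => decide (pvName a < pvName b)) x (pvSorted l) := by
  unfold pvSorted
  rw [PySem.List.sorted_eq_foldl_insertBy, PySem.List.sorted_eq_foldl_insertBy, List.foldl_append]
  rfl

theorem pv_mapV_contains (d : PySem.Dict String (List (List (String × String)))) (k : String) :
    (pvMapV d).contains k = d.contains k := by
  simp [pvMapV, PySem.Dict.contains, Function.comp_def]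

theorem pv_mapV_getD (d : PySem.Dict String (List (List (String × String)))) (k : String) :
    (pvMapV d).getD k [] = pvSorted (d.getD k []) := by
  simp only [pvMapV, PySem.Dict.getD, PySem.Dict.get?, List.find?_map]
  have : ((fun p : String × List (List (String × String)) => p.1 == k) ∘
          (fun p : String × List (List (String × String)) => (p.1, pvSorted p.2)))
        = fun p => p.1 == k := by funext p; rfl
  rw [this]
  cases h : List.find? (fun p => p.1 == k) d.1 with
  | none => simp [pvSorted, PySem.List.sorted]
  | some v => simp

theorem pv_mapV_insert (d : PySem.Dict String (List (List (String × String)))) (k : String)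
    (v : List (List (String × String))) :
    pvMapV (d.insert k v) = (pvMapV d).insert k (pvSorted v) := by
  by_cases h : d.contains k = true
  · simp only [PySem.Dict.insert, pv_mapV_contains, h, if_pos]
    simp only [pvMapV, List.map_map]
    congr 1
    apply List.map_congr_left
    intro p _
    by_cases hp : p.1 = k
    · simp [hp]
    · have hb : (p.1 == k) = false := by simp [hp]
      simp [hp]
  · simp only [PySem.Dict.insert, pv_mapV_contains, h]
    simp [pvMapV]

-- phase 1: B's fold keeps groups as the sorted images of A's groups
theorem pv_phase1 (l : List (String × List (String × String))) :
    ∀ d : PySem.Dict String (List (List (String × String))),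
    l.foldl (fun org kv =>
      let info := (PySem.Dict.insert (PySem.Dict.mk kv.2) "name" kv.1).items
      let building := (PySem.Str.split₀ kv.1).headD ""
      let group := org.getD building []
      let i := pvFindIdx group kv.1 group.length
      org.insert building (PySem.List.insert group (i : Int) info)) (pvMapV d)
    = pvMapV (l.foldl (fun org kv =>
        let building := (PySem.Str.split₀ kv.1).headD ""
        let info := (PySem.Dict.insert (PySem.Dict.mk kv.2) "name" kv.1).items
        org.insert building (org.getD building [] ++ [info])) d) := by
  induction l with
  | nil => intro d; rfl
  | cons kv l ih =>
    intro d
    simp only [List.foldl_cons]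
    have hname : pvName ((PySem.Dict.insert (PySem.Dict.mk kv.2) "name" kv.1).items) = kv.1 := by
      have h0 : pvName ((PySem.Dict.insert (PySem.Dict.mk kv.2) "name" kv.1).items)
          = PySem.Dict.getD ((PySem.Dict.mk kv.2).insert "name" kv.1) "name" "" := rfl
      rw [h0]
      simp [PySem.Dict.getD, PySem.Dict.get?_insert_self]
    have hps : (pvSorted (d.getD ((PySem.Str.split₀ kv.1).headD "") [])).Pairwise
        (fun a b => pvName a ≤ pvName b) := PySem.List.sorted_pairwise _ _
    have hstep :
        (pvMapV d).insert ((PySem.Str.split₀ kv.1).headD "")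
          (PySem.List.insert ((pvMapV d).getD ((PySem.Str.split₀ kv.1).headD "") [])
            ((pvFindIdx ((pvMapV d).getD ((PySem.Str.split₀ kv.1).headD "") []) kv.1
              ((pvMapV d).getD ((PySem.Str.split₀ kv.1).headD "") []).length : Nat) : Int)
            ((PySem.Dict.insert (PySem.Dict.mk kv.2) "name" kv.1).items))
        = pvMapV (d.insert ((PySem.Str.split₀ kv.1).headD "")
            (d.getD ((PySem.Str.split₀ kv.1).headD "") []
              ++ [(PySem.Dict.insert (PySem.Dict.mk kv.2) "name" kv.1).items])) := by
      rw [pv_mapV_insert, pv_mapV_getD]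
      congr 1
      rw [pv_sorted_append]
      exact pv_insert_eq_insertBy _ kv.1 hname _ hps
    rw [hstep, ih]

-- step of phase 2 commutes with a cons whose key the step does not touch
theorem pv_phase2_cons (k : String) (w : List (List (String × String)))
    (rest : List (String × List (List (String × String)))) :
    ∀ ks : List String, (∀ x ∈ ks, x ≠ k) →
    ks.foldl (fun d j => d.insert j (pvSorted (d.getD j []))) (PySem.Dict.mk ((k, w) :: rest))
    = PySem.Dict.mk ((k, w) ::
        (ks.foldl (fun d j => d.insert j (pvSorted (d.getD j []))) (PySem.Dict.mk rest)).items) := by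
  intro ks
  induction ks generalizing w rest with
  | nil => intro _; rfl
  | cons j ks ih =>
    intro hk
    have hj : j ≠ k := hk j (List.mem_cons_self)
    have hbeq : (j == k) = false := by simp [hj]
    have hbeq' : (k == j) = false := by simp [Ne.symm hj]
    have hgetD : (PySem.Dict.mk ((k, w) :: rest)).getD j [] = (PySem.Dict.mk rest).getD j [] := by
      simp [PySem.Dict.getD, PySem.Dict.get?, List.find?, hbeq']
    have hcont : (PySem.Dict.mk ((k, w) :: rest)).contains j = (PySem.Dict.mk rest).contains j := by
      simp [PySem.Dict.contains, hbeq']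
    have hins : (PySem.Dict.mk ((k, w) :: rest)).insert j (pvSorted ((PySem.Dict.mk rest).getD j []))
        = PySem.Dict.mk ((k, w) ::
            ((PySem.Dict.mk rest).insert j (pvSorted ((PySem.Dict.mk rest).getD j []))).items) := by
      simp only [PySem.Dict.insert, hcont]
      by_cases h : (PySem.Dict.mk rest).contains j = true
      · simp [h, Ne.symm hj]
      · simp [h]
    simp only [List.foldl_cons, hgetD, hins]
    rw [ih _ _ (fun x hx => hk x (List.mem_cons_of_mem j hx))]

-- phase 2: A's per-key sorting fold computes pvMapV (keys distinct)
theorem pv_phase2 (d : PySem.Dict String (List (List (String × String))))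
    (hnd : (d.items.map Prod.fst).Nodup) :
    d.keys.foldl (fun d k => d.insert k (PySem.List.sorted (d.getD k []) pvName)) d = pvMapV d := by
  show d.keys.foldl (fun d j => d.insert j (pvSorted (d.getD j []))) d = pvMapV d
  obtain ⟨items⟩ := d
  induction items with
  | nil => rfl
  | cons p rest ih =>
    have hnd' := (List.nodup_cons.mp hnd)
    have hkeys : (PySem.Dict.mk (p :: rest)).keys = p.1 :: (rest.map Prod.fst) := by
      simp [PySem.Dict.keys]
    have hget1 : (PySem.Dict.mk (p :: rest)).getD p.1 [] = p.2 := by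
      simp [PySem.Dict.getD, PySem.Dict.get?, List.find?]
    have hcont1 : (PySem.Dict.mk (p :: rest)).contains p.1 = true := by
      simp [PySem.Dict.contains]
    have hins1 : (PySem.Dict.mk (p :: rest)).insert p.1 (pvSorted p.2)
        = PySem.Dict.mk ((p.1, pvSorted p.2) :: rest) := by
      simp only [PySem.Dict.insert, hcont1, if_pos]
      congr 1
      simp only [List.map_cons, BEq.rfl, if_pos]
      congr 1
      have hq : ∀ q ∈ rest, (fun q : String × List (List (String × String)) =>
          if (q.1 == p.1) = true then (p.1, pvSorted p.2) else q) q = id q := by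
        intro q hq
        have hne : q.1 ≠ p.1 := by
          intro h
          exact hnd'.1 (h ▸ List.mem_map_of_mem (f := Prod.fst) hq)
        simp [hne]
      rw [List.map_congr_left hq, List.map_id]
    rw [hkeys]
    simp only [List.foldl_cons, hget1, hins1]
    rw [pv_phase2_cons p.1 (pvSorted p.2) rest (rest.map Prod.fst)
          (fun x hx => by
            intro h
            exact hnd'.1 (h ▸ hx)),
        show (List.map Prod.fst rest)
          = (PySem.Dict.mk rest : PySem.Dict String (List (List (String × String)))).keys from rfl,
        ih hnd'.2]
    simp [pvMapV]

-- ===== VERDICT (by name: the statement is the Claim_ definition above) =====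
theorem organize_locations_py_spec : Claim_equal_organize_locations_py := by
  intro l _ _
  unfold Spec_organize_locations_py organize_locations_py organize_locations_py_alt
  dsimp only
  conv_rhs => rw [show (PySem.Dict.mk [] : PySem.Dict String (List (List (String × String))))
      = pvMapV (PySem.Dict.mk []) from rfl,
    pv_phase1 l (PySem.Dict.mk [])]
  set org := l.foldl (fun org kv =>
      let building := (PySem.Str.split₀ kv.1).headD ""
      let info := (PySem.Dict.insert (PySem.Dict.mk kv.2) "name" kv.1).items
      org.insert building (org.getD building [] ++ [info]))
    (PySem.Dict.mk [] : PySem.Dict String (List (List (String × String)))) with horg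
  have hnodup : (org.items.map Prod.fst).Nodup := by
    rw [horg]
    exact PySem.Dict.nodup_keys_foldl_insert_key l
      (fun kv => (PySem.Str.split₀ kv.1).headD "")
      (fun org kv => org.getD ((PySem.Str.split₀ kv.1).headD "") []
        ++ [(PySem.Dict.insert (PySem.Dict.mk kv.2) "name" kv.1).items])
      (PySem.Dict.mk []) (by simp [PySem.Dict.keys])
  rw [pv_phase2 org hnodup]
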